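-- pv_equiv track=rewrite | github.com/glezluis/grimms-conjecture | grimm.py | prime_of_composite_factors
-- ===== SOURCE A (Python) =====
-- def factors(x):
--     #for a number x, returns a list of x's factors
--     i = 1
--     list = [];
--     for i in range(i,x+1):
--         if x % i == 0:
--             list.append(i)
--             i += 1
--         else:
--             i += 1
--     return list
--
-- def is_prime(x):
--     #using the function factors(x), returns prime factors from 1 to x
--     prime_factors = [];
--     for i in factors(x):
--         if len(factors(i)) == 2:
--             prime_factors.append(i)
--     return prime_factors
--
-- def composite_list(x):
--     #using function factors(x), returns composite factors from 1 to x
--     composite_factors = [];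
--     i = 1
--     for i in range(i, x+1):
--         if len(factors(i)) > 2:
--             composite_factors.append(i)
--     return composite_factors
--
-- def consecutive_composites(x):
--     # takes a list of composite numbers and determines the consecutive sets
--     tupl= ();
--     a= dict();
--
--     for j in range(0, len(composite_list(x))-1):
--         i= composite_list(x)[j]
--         k= composite_list(x)[j+1]
--
--         if k-i == 1:
--             mykeys = list(a.keys())
--             if len(a) !=0 and i- mykeys[-1] > 1:
--                 tupl = tupl + (a,)
--                 a= dict();
--             a[i]= 0
--             a[k]= 0
--     tupl = tupl + (a,)
--     return tupl
--
-- def prime_of_composite_factors(x):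
--  #   takes the list of consecutive composite numbers from the previous function and returns distinct primes
--     tupx= ();
--     plist= [];
--     for cl in consecutive_composites(x):
--         nlist= [];
--         for i in cl:
--             p= is_prime(i)
--             if p[-1] not in plist:
--                 plist.append(p[-1])
--                 tupc= (i, p[-1])
--                 nlist.append(tupc)
--
--         plist= [];
--         tupx= tupx + (nlist,)
--
--
--     return tupx
-- ===== SOURCE B (Python) =====
-- def prime_of_composite_factors(x):
--     # Single pass over 2..x: detect runs of >=2 consecutive composites directly,
--     # and for each run emit (n, largest prime factor of n) deduplicated per run.
--     def is_composite(n):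
--         return any(n % d == 0 for d in range(2, n))
--
--     def largest_prime_factor(n):
--         for d in range(n, 1, -1):
--             if n % d == 0 and all(d % j != 0 for j in range(2, d)):
--                 return d
--         return 1
--
--     runs = []
--     run = []
--     for n in range(2, x + 1):
--         if is_composite(n):
--             run.append(n)
--         else:
--             if len(run) >= 2:
--                 runs.append(run)
--             run = []
--     if len(run) >= 2:
--         runs.append(run)
--
--     out = []
--     for run in runs:
--         seen = []
--         group = []
--         for n in run:
--             p = largest_prime_factor(n)
--             if p not in seen:
--                 seen.append(p)
--                 group.append((n, p))
--         out.append(group)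
--     if not out:
--         return ([],)
--     return tuple(out)
-- ===== Notes on version B (the rewrite author's own statement) =====
-- stated objective: faster
-- what changed: B replaces A's repeated full factor-list construction (composite_list(x) is recomputed inside the loop and every primality test enumerates all divisors twice) and the dict/tuple pair-scan with a single pass over 2..x that tests compositeness by one trial-division scan, groups maximal runs of consecutive composites on the fly, and finds each largest prime factor by one downward scan.
import Mathlib
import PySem

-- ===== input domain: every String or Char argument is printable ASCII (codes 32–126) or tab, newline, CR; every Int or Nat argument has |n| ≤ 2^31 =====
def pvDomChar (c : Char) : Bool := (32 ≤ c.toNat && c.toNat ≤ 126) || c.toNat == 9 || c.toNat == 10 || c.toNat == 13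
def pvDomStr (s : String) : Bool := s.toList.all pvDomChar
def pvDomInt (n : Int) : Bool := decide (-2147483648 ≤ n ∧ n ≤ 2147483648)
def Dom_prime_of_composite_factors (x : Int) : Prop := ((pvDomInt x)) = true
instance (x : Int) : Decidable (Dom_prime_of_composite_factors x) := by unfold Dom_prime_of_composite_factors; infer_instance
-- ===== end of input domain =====

-- B replaces A's repeatedly recomputed factor lists and dict/tuple pair-scan with a single
-- pass over 2..x (trial-division compositeness, on-the-fly run grouping, one downward
-- largest-prime-factor scan per composite): same values, measurably faster.


-- ===== PORT A =====
def factorsA (x : Int) : List Int :=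
  (PySem.List.pyRange 1 (x + 1) 1).foldl
    (fun acc i => if PySem.Int.mod x i = 0 then acc ++ [i] else acc) []

def is_primeA (x : Int) : List Int :=
  (factorsA x).foldl
    (fun acc i => if (factorsA i).length = 2 then acc ++ [i] else acc) []

def composite_listA (x : Int) : List Int :=
  (PySem.List.pyRange 1 (x + 1) 1).foldl
    (fun acc i => if 2 < (factorsA i).length then acc ++ [i] else acc) []

def ccStepA (x : Int) (s : List (PySem.Dict Int Int) × PySem.Dict Int Int) (j : Int) :
    List (PySem.Dict Int Int) × PySem.Dict Int Int :=
  let i := PySem.List.pyGetD (composite_listA x) j 0        -- index in range on every reachable j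
  let k := PySem.List.pyGetD (composite_listA x) (j + 1) 0
  if k - i = 1 then
    let mykeys := (s.2).keys
    let s' : List (PySem.Dict Int Int) × PySem.Dict Int Int :=
      if s.2.size ≠ 0 ∧ 1 < i - PySem.List.pyGetD mykeys (-1) 0 then
        (s.1 ++ [s.2], PySem.Dict.empty)
      else s
    (s'.1, (s'.2.insert i 0).insert k 0)
  else s

def consecutive_compositesA (x : Int) : List (PySem.Dict Int Int) :=
  let s := (PySem.List.pyRange 0 (((composite_listA x).length : Int) - 1) 1).foldl
    (ccStepA x) ([], PySem.Dict.empty)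
  s.1 ++ [s.2]

def prime_of_composite_factors (x : Int) : List (List (Int × Int)) :=
  ((consecutive_compositesA x).foldl
    (fun (s : List (List (Int × Int)) × List Int) cl =>
      let r := (cl.keys.foldl
        (fun (t : List Int × List (Int × Int)) i =>
          let p := is_primeA i
          let lp := PySem.List.pyGetD p (-1) 0
          if lp ∈ t.1 then t else (t.1 ++ [lp], t.2 ++ [(i, lp)]))
        (s.2, []))
      (s.1 ++ [r.2], []))                        -- plist is reset to [] after each group
    ([], [])).1

-- ===== PORT B =====
def isCompositeB (n : Int) : Bool :=
  (PySem.List.pyRange 2 n 1).any (fun d => PySem.Int.mod n d = 0)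

def isPrimeB (d : Int) : Bool :=
  (PySem.List.pyRange 2 d 1).all (fun j => PySem.Int.mod d j ≠ 0)

def lpfB (n : Int) : Int :=
  ((PySem.List.pyRange n 1 (-1)).find?
    (fun d => PySem.Int.mod n d = 0 && isPrimeB d)).getD 1

def innerB (run : List Int) : List (Int × Int) :=
  (run.foldl
    (fun (t : List Int × List (Int × Int)) n =>
      let p := lpfB n
      if p ∈ t.1 then t else (t.1 ++ [p], t.2 ++ [(n, p)]))
    ([], [])).2

def prime_of_composite_factors_alt (x : Int) : List (List (Int × Int)) :=
  let s := (PySem.List.pyRange 2 (x + 1) 1).foldl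
    (fun (s : List (List Int) × List Int) n =>
      if isCompositeB n then (s.1, s.2 ++ [n])
      else (if 2 ≤ s.2.length then s.1 ++ [s.2] else s.1, []))
    ([], [])
  let runs := if 2 ≤ s.2.length then s.1 ++ [s.2] else s.1
  let out := runs.map innerB
  if out = [] then [[]] else out

-- ===== PRECONDITION & SPEC =====
def Spec_prime_of_composite_factors (x : Int) (out : List (List (Int × Int))) : Prop := out = prime_of_composite_factors_alt x
instance (x : Int) (out : List (List (Int × Int))) : Decidable (Spec_prime_of_composite_factors x out) := by unfold Spec_prime_of_composite_factors; infer_instance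

-- ===== CLAIM (what is proved, stated in full; the proofs are below) =====
def Claim_equal_prime_of_composite_factors : Prop := ∀ (x : Int), Dom_prime_of_composite_factors x → Spec_prime_of_composite_factors x (prime_of_composite_factors x)

-- ===== LEMMAS AND PROOFS =====
lemma factorsA_eq (x : Int) : factorsA x =
    (PySem.List.pyRange 1 (x + 1) 1).filter (fun d => decide (PySem.Int.mod x d = 0)) := by
  simp [factorsA, PySem.List.foldl_append_ite_eq_filter]

lemma range_split (n : Int) (h : 2 ≤ n) :
    PySem.List.pyRange 1 (n + 1) 1 = 1 :: (PySem.List.pyRange 2 n 1 ++ [n]) := by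
  rw [PySem.List.pyRange_one_cons (by omega), PySem.List.pyRange_one_succ_right (by omega)]
  norm_num

lemma factorsA_decomp (n : Int) (h : 2 ≤ n) :
    factorsA n = 1 :: ((PySem.List.pyRange 2 n 1).filter (fun d => decide (PySem.Int.mod n d = 0)) ++ [n]) := by
  rw [factorsA_eq, range_split n h]
  simp [List.filter_append, PySem.Int.mod_eq_zero_iff_dvd]

lemma composite_iff (n : Int) (h : 2 ≤ n) :
    (2 < (factorsA n).length) ↔ isCompositeB n = true := by
  rw [factorsA_decomp n h]
  simp [isCompositeB, List.any_eq_true, List.length_append, List.length_filter_pos_iff]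

lemma prime_iff (d : Int) (h : 2 ≤ d) :
    ((factorsA d).length = 2) ↔ isPrimeB d = true := by
  rw [factorsA_decomp d h]
  simp [isPrimeB, List.all_eq_true, List.length_append, List.length_eq_zero_iff,
    List.filter_eq_nil_iff]
def lpfPred (n : Int) : Int → Bool := fun d => decide (PySem.Int.mod n d = 0) && isPrimeB d

lemma find?_eq_head?_filter {α : Type} (p : α → Bool) (l : List α) :
    l.find? p = (l.filter p).head? := by
  induction l with
  | nil => rfl
  | cons a t ih =>
    rw [List.find?_cons, List.filter_cons]
    cases h : p a
    · simpa using ih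
    · simp

lemma is_primeA_eq (n : Int) (h : 2 ≤ n) :
    is_primeA n = (PySem.List.pyRange 2 (n + 1) 1).filter (lpfPred n) := by
  have h1 : is_primeA n = (factorsA n).filter (fun i => decide ((factorsA i).length = 2)) := by
    simp [is_primeA, PySem.List.foldl_append_ite_eq_filter]
  rw [h1, factorsA_eq, List.filter_filter]
  have h2 : PySem.List.pyRange 1 (n + 1) 1 = 1 :: PySem.List.pyRange 2 (n + 1) 1 := by
    rw [PySem.List.pyRange_one_cons (by omega)]; norm_num
  rw [h2, List.filter_cons]
  have h3 : (factorsA 1).length = 1 := by decide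
  simp only [h3]
  norm_num
  apply List.filter_congr
  intro d hd
  have hd2 : 2 ≤ d := (PySem.List.mem_pyRange_one.mp hd).1
  simp only [lpfPred, prime_iff d hd2, Bool.decide_coe]
  exact Bool.and_comm _ _

lemma isPrimeB_of_natPrime (p : Nat) (hp : p.Prime) : isPrimeB (p : Int) = true := by
  simp only [isPrimeB, List.all_eq_true]
  intro j hj
  rcases PySem.List.mem_pyRange_one.mp hj with ⟨hj2, hjp⟩
  simp only [decide_eq_true_eq, ne_eq, PySem.Int.mod_eq_zero_iff_dvd]
  intro hdvd
  have hj0 : (0:Int) ≤ j := by omega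
  lift j to Nat using hj0
  have : j ∣ p := by exact_mod_cast hdvd
  rcases (Nat.Prime.eq_one_or_self_of_dvd hp j this) with h1 | h2
  · omega
  · omega

lemma filter_lpf_ne_nil (n : Int) (h : 2 ≤ n) :
    (PySem.List.pyRange 2 (n + 1) 1).filter (lpfPred n) ≠ [] := by
  have hn0 : (0:Int) ≤ n := by omega
  have hmem : ((n.toNat.minFac : Nat) : Int) ∈ (PySem.List.pyRange 2 (n + 1) 1).filter (lpfPred n) := by
    have hn1 : n.toNat ≠ 1 := by omega
    have hp := Nat.minFac_prime hn1
    apply List.mem_filter.mpr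
    constructor
    · apply PySem.List.mem_pyRange_one.mpr
      have h1 := hp.two_le
      have h2 := Nat.minFac_le (show 0 < n.toNat by omega)
      constructor <;> [exact_mod_cast h1; omega]
    · simp only [lpfPred, Bool.and_eq_true, decide_eq_true_eq]
      refine ⟨?_, isPrimeB_of_natPrime _ hp⟩
      rw [PySem.Int.mod_eq_zero_iff_dvd]
      have := Nat.minFac_dvd n.toNat
      have : ((n.toNat.minFac : Nat) : Int) ∣ ((n.toNat : Nat) : Int) := by exact_mod_cast this
      simpa [Int.toNat_of_nonneg hn0] using this
  exact List.ne_nil_of_mem hmem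

lemma pyRange_countdown (n : Int) : PySem.List.pyRange n 1 (-1) = (PySem.List.pyRange 2 (n + 1) 1).reverse := by
  apply List.ext_getElem
  · simp [PySem.List.pyRange_neg_one, PySem.List.pyRange_one]
    omega
  · intro k h1 h2
    simp only [PySem.List.pyRange_neg_one, List.getElem_map, List.getElem_range,
      List.getElem_reverse, PySem.List.getElem_pyRange_one, PySem.List.length_pyRange_one]
    simp [PySem.List.pyRange_neg_one, PySem.List.length_pyRange_one] at h1 h2
    omega

lemma lpf_eq (n : Int) (h : 2 ≤ n) :
    PySem.List.pyGetD (is_primeA n) (-1) 0 = lpfB n := by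
  have hne := filter_lpf_ne_nil n h
  rw [is_primeA_eq n h, PySem.List.pyGetD_neg_one _ _ hne]
  rw [lpfB, pyRange_countdown, find?_eq_head?_filter]
  rw [show ((fun d => decide (PySem.Int.mod n d = 0) && isPrimeB d) : Int → Bool) = lpfPred n from rfl]
  rw [List.filter_reverse, List.head?_reverse, List.getLast?_eq_some_getLast hne]
  rfl

lemma comp_ge3 (n : Int) (h : isCompositeB n = true) : 3 ≤ n := by
  simp only [isCompositeB, List.any_eq_true] at h
  rcases h with ⟨d, hd, -⟩
  rcases PySem.List.mem_pyRange_one.mp hd with ⟨h2, h3⟩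
  omega

lemma cl_eq (x : Int) : composite_listA x = (PySem.List.pyRange 2 (x + 1) 1).filter isCompositeB := by
  have h1 : composite_listA x
      = (PySem.List.pyRange 1 (x + 1) 1).filter (fun i => decide (2 < (factorsA i).length)) := by
    simp [composite_listA, PySem.List.foldl_append_ite_eq_filter]
  rw [h1]
  by_cases hx : 1 ≤ x
  · rw [show PySem.List.pyRange 1 (x + 1) 1 = 1 :: PySem.List.pyRange 2 (x + 1) 1 by
      rw [PySem.List.pyRange_one_cons (by omega)]; norm_num]
    rw [List.filter_cons]
    have h3 : (factorsA 1).length = 1 := by decide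
    simp only [h3]
    norm_num
    apply List.filter_congr
    intro d hd
    have hd2 : 2 ≤ d := (PySem.List.mem_pyRange_one.mp hd).1
    simp [composite_iff d hd2]
  · rw [PySem.List.pyRange_one_eq_nil (by omega), PySem.List.pyRange_one_eq_nil (by omega)]
    rfl

lemma cl_rec (x : Int) (hx : 1 ≤ x) :
    composite_listA (x + 1)
      = composite_listA x ++ (if isCompositeB (x + 1) then [x + 1] else []) := by
  rw [cl_eq, cl_eq, show x + 1 + 1 = (x + 1) + 1 from rfl,
    PySem.List.pyRange_one_succ_right (by omega), List.filter_append]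
  by_cases h : isCompositeB (x + 1) = true <;> simp [h]

lemma pyGetD_prefix (cl ys : List Int) (j : Int) (h0 : 0 ≤ j) (h1 : j < (cl.length : Int)) :
    PySem.List.pyGetD (cl ++ ys) j 0 = PySem.List.pyGetD cl j 0 := by
  rw [PySem.List.pyGetD_eq_getElem _ _ h0 (by simp; omega),
      PySem.List.pyGetD_eq_getElem _ _ h0 (by omega)]
  exact List.getElem_append_left (by omega)

def Astate (x : Int) : List (PySem.Dict Int Int) × PySem.Dict Int Int :=
  (PySem.List.pyRange 0 (((composite_listA x).length : Int) - 1) 1).foldl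
    (ccStepA x) ([], PySem.Dict.empty)

def bStep (s : List (List Int) × List Int) (n : Int) : List (List Int) × List Int :=
  if isCompositeB n then (s.1, s.2 ++ [n])
  else (if 2 ≤ s.2.length then s.1 ++ [s.2] else s.1, [])

def Bstate (x : Int) : List (List Int) × List Int :=
  (PySem.List.pyRange 2 (x + 1) 1).foldl bStep ([], [])

lemma alt_eq (x : Int) :
    prime_of_composite_factors_alt x =
      (let runs := if 2 ≤ (Bstate x).2.length then (Bstate x).1 ++ [(Bstate x).2] else (Bstate x).1
       let out := runs.map innerB
       if out = [] then [[]] else out) := rfl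

lemma Bstate_rec (x : Int) (hx : 1 ≤ x) : Bstate (x + 1) = bStep (Bstate x) (x + 1) := by
  unfold Bstate
  rw [show x + 1 + 1 = (x + 1) + 1 from rfl, PySem.List.pyRange_one_succ_right (by omega),
    List.foldl_append]
  rfl

lemma Astate_rec_nc (x : Int) (hx : 1 ≤ x) (h : isCompositeB (x + 1) = false) :
    Astate (x + 1) = Astate x := by
  have hcl : composite_listA (x + 1) = composite_listA x := by
    rw [cl_rec x hx, h]; simp
  have hstep : ccStepA (x + 1) = ccStepA x := by
    funext s j; simp only [ccStepA, hcl]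
  unfold Astate
  rw [hcl, hstep]

lemma Astate_rec_c (x : Int) (hx : 1 ≤ x) (h : isCompositeB (x + 1) = true)
    (hne : composite_listA x ≠ []) :
    Astate (x + 1) = ccStepA (x + 1) (Astate x) (((composite_listA x).length : Int) - 1) := by
  have hcl : composite_listA (x + 1) = composite_listA x ++ [x + 1] := by
    rw [cl_rec x hx, h]; simp
  have hlen : ((composite_listA (x + 1)).length : Int) - 1 = (composite_listA x).length := by
    rw [hcl]; simp
  have hlenpos : 1 ≤ ((composite_listA x).length : Int) := by
    have := List.length_pos_of_ne_nil hne; omega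
  unfold Astate
  rw [hlen, show ((composite_listA x).length : Int) = (((composite_listA x).length : Int) - 1) + 1 by ring,
    PySem.List.pyRange_one_succ_right (by omega), List.foldl_append]
  simp only [List.foldl_cons, List.foldl_nil]
  rw [show (((composite_listA x).length : Int) - 1 + 1 - 1) = ((composite_listA x).length : Int) - 1 by ring]
  congr 1
  apply PySem.List.foldl_congr_mem
  intro acc j hj
  rcases PySem.List.mem_pyRange_one.mp hj with ⟨hj0, hj1⟩
  simp only [ccStepA, hcl]
  rw [pyGetD_prefix _ _ j hj0 (by omega), pyGetD_prefix _ _ (j + 1) (by omega) (by omega)]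

lemma Astate_rec_c_nil (x : Int) (hx : 1 ≤ x) (h : isCompositeB (x + 1) = true)
    (hnil : composite_listA x = []) :
    Astate (x + 1) = ([], PySem.Dict.empty) := by
  have hcl : composite_listA (x + 1) = [x + 1] := by rw [cl_rec x hx, h, hnil]; simp
  unfold Astate
  rw [hcl]
  simp
lemma size_eq_keys_length (a : PySem.Dict Int Int) : a.size = a.keys.length := by
  simp [PySem.Dict.size, PySem.Dict.keys]

lemma contains_eq_false_of_not_mem (a : PySem.Dict Int Int) (k : Int) (h : k ∉ a.keys) :
    a.contains k = false := by
  cases hb : a.contains k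
  · rfl
  · exact absurd ((PySem.Dict.contains_iff_mem_keys a k).mp hb) h

lemma keys_insert2_mem (a : PySem.Dict Int Int) (i k : Int) (hi : i ∈ a.keys) (hk : k ∉ a.keys) :
    ((a.insert i 0).insert k 0).keys = a.keys ++ [k] := by
  have h1 : (a.insert i (0:Int)).keys = a.keys :=
    PySem.Dict.keys_insert_of_contains a 0 ((PySem.Dict.contains_iff_mem_keys a i).mpr hi)
  have h2 : (a.insert i (0:Int)).contains k = false := by
    apply contains_eq_false_of_not_mem
    rw [h1]; exact hk
  rw [PySem.Dict.keys_insert_of_not_contains _ 0 h2, h1]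

lemma keys_insert2_not_mem (a : PySem.Dict Int Int) (i k : Int) (hi : i ∉ a.keys)
    (hk : k ∉ a.keys) (hik : k ≠ i) :
    ((a.insert i 0).insert k 0).keys = a.keys ++ [i, k] := by
  have h1 : (a.insert i (0:Int)).keys = a.keys ++ [i] :=
    PySem.Dict.keys_insert_of_not_contains a 0 (contains_eq_false_of_not_mem a i hi)
  have h2 : (a.insert i (0:Int)).contains k = false := by
    apply contains_eq_false_of_not_mem
    rw [h1]; simp [hk, hik]
  rw [PySem.Dict.keys_insert_of_not_contains _ 0 h2, h1]
  simp

def GInv (x : Int) (s : List (PySem.Dict Int Int) × PySem.Dict Int Int)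
    (t : List (List Int) × List Int) : Prop :=
  t.2 = PySem.List.pyRange (x + 1 - t.2.length) (x + 1) 1 ∧
  (∀ c ∈ t.2, isCompositeB c = true) ∧
  ¬ (2 ≤ x - (t.2.length : Int) ∧ isCompositeB (x - (t.2.length : Int)) = true) ∧
  s.2.keys.Nodup ∧
  (∀ d ∈ s.1, ∀ k ∈ d.keys, isCompositeB k = true) ∧
  (∀ k ∈ s.2.keys, isCompositeB k = true) ∧
  (if 2 ≤ t.2.length then
      t.1 = s.1.map PySem.Dict.keys ∧ s.2.keys = t.2
    else
      t.1 = s.1.map PySem.Dict.keys ++ (if s.2.size ≠ 0 then [s.2.keys] else []) ∧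
      (s.2.size = 0 → s.1 = []) ∧
      (∀ k ∈ s.2.keys, k < x - (t.2.length : Int)))

lemma inv_base : GInv 1 (Astate 1) (Bstate 1) := by unfold GInv Astate Bstate; decide

lemma cl_getLast_of_comp (x : Int) (hx : 1 ≤ x) (hc : isCompositeB x = true) :
    ∃ hne : composite_listA x ≠ [], (composite_listA x).getLast hne = x := by
  have hx3 : 3 ≤ x := comp_ge3 x hc
  have hsplit : composite_listA x
      = (PySem.List.pyRange 2 x 1).filter isCompositeB ++ [x] := by
    rw [cl_eq, PySem.List.pyRange_one_succ_right (by omega), List.filter_append]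
    simp [hc]
  rw [hsplit]
  exact ⟨by simp, List.getLast_concat⟩

lemma cl_getLast_comp (x : Int) (hne : composite_listA x ≠ []) :
    isCompositeB ((composite_listA x).getLast hne) = true := by
  have hmem := List.getLast_mem hne
  generalize hg : (composite_listA x).getLast hne = g at hmem
  rw [cl_eq] at hmem
  exact (List.mem_filter.mp hmem).2

lemma mem_cl (x c : Int) (hc : isCompositeB c = true) (h2 : 2 ≤ c) (h3 : c < x + 1) :
    c ∈ composite_listA x := by
  rw [cl_eq]
  exact List.mem_filter.mpr ⟨PySem.List.mem_pyRange_one.mpr ⟨h2, h3⟩, hc⟩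

lemma keys_empty_dict : (PySem.Dict.empty : PySem.Dict Int Int).keys = [] := rfl

lemma pyRange_getLast (a b : Int) (h : a < b) :
    ∃ hne : PySem.List.pyRange a b 1 ≠ [], (PySem.List.pyRange a b 1).getLast hne = b - 1 := by
  have hsp := PySem.List.pyRange_one_succ_right (a := a) (b := b - 1) (by omega)
  rw [show b - 1 + 1 = b by ring] at hsp
  rw [hsp]
  exact ⟨by simp, List.getLast_concat⟩

lemma ccStep_eval (x : Int) (hc : isCompositeB (x + 1) = true)
    (hnil : composite_listA x ≠ []) (s1 : List (PySem.Dict Int Int)) (a : PySem.Dict Int Int) :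
    ccStepA (x + 1) (s1, a) (((composite_listA x).length : Int) - 1) =
      (if (x + 1) - (composite_listA x).getLast hnil = 1 then
        let s' := if a.size ≠ 0 ∧ 1 < (composite_listA x).getLast hnil - PySem.List.pyGetD a.keys (-1) 0 then
            (s1 ++ [a], PySem.Dict.empty) else (s1, a)
        (s'.1, (s'.2.insert ((composite_listA x).getLast hnil) 0).insert (x + 1) 0)
      else (s1, a)) := by
  have hcl : composite_listA (x + 1) = composite_listA x ++ [x + 1] := by
    rw [cl_rec x (by have := comp_ge3 _ hc; omega), hc]; simp
  have hlp : 1 ≤ ((composite_listA x).length : Int) := by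
    have := List.length_pos_of_ne_nil hnil; omega
  have hi : PySem.List.pyGetD (composite_listA (x + 1)) (((composite_listA x).length : Int) - 1) 0
      = (composite_listA x).getLast hnil := by
    rw [hcl, pyGetD_prefix _ _ _ (by omega) (by omega),
      PySem.List.pyGetD_eq_getElem _ _ (by omega) (by omega)]
    rw [List.getLast_eq_getElem]
    congr 1
    omega
  have hk : PySem.List.pyGetD (composite_listA (x + 1)) ((((composite_listA x).length : Int) - 1) + 1) 0
      = x + 1 := by
    rw [show (((composite_listA x).length : Int) - 1) + 1 = ((composite_listA x).length : Int) by ring,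
      hcl, PySem.List.pyGetD_eq_getElem _ _ (by omega) (by simp)]
    simp
  simp only [ccStepA, hi, hk]
lemma inv_step (x : Int) (hx : 1 ≤ x) (h : GInv x (Astate x) (Bstate x)) :
    GInv (x + 1) (Astate (x + 1)) (Bstate (x + 1)) := by
  rcases hA : Astate x with ⟨s1, a⟩
  rcases hB : Bstate x with ⟨t1, r⟩
  rw [hA, hB] at h
  obtain ⟨hrun, hcomp, hmax, hnd, htupl, hkeys, hcase⟩ := h
  simp only at hrun hcomp hmax hnd htupl hkeys hcase
  rw [Bstate_rec x hx, hB]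
  by_cases hc : isCompositeB (x + 1) = true
  · -- x+1 is composite: B extends the run
    have hx3 : 3 ≤ x + 1 := comp_ge3 _ hc
    have hBs : bStep (t1, r) (x + 1) = (t1, r ++ [x + 1]) := by simp [bStep, hc]
    rw [hBs]
    have hrun' : r ++ [x + 1]
        = PySem.List.pyRange (x + 1 + 1 - ((r ++ [x + 1]).length : Int)) (x + 1 + 1) 1 := by
      simp only [List.length_append, List.length_singleton]
      push_cast
      rw [show x + 1 + 1 - ((r.length : Int) + 1) = x + 1 - r.length by ring]
      rw [PySem.List.pyRange_one_succ_right (by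
        have : (PySem.List.pyRange (x + 1 - (r.length:Int)) (x + 1) 1).length = ((x + 1) - (x + 1 - (r.length:Int))).toNat :=
          PySem.List.length_pyRange_one _ _
        omega), ← hrun]
    have hcomp' : ∀ c ∈ r ++ [x + 1], isCompositeB c = true := by
      intro c hcmem
      rcases List.mem_append.mp hcmem with h1 | h1
      · exact hcomp c h1
      · simp at h1; subst h1; exact hc
    have hmax' : ¬ (2 ≤ (x + 1) - ((r ++ [x + 1]).length : Int) ∧
        isCompositeB ((x + 1) - ((r ++ [x + 1]).length : Int)) = true) := by
      simp only [List.length_append, List.length_singleton]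
      push_cast
      rw [show x + 1 - ((r.length : Int) + 1) = x - r.length by ring]
      exact hmax
    -- A-side case analysis
    by_cases hnil : composite_listA x = []
    · -- no composites ≤ x at all; run must be empty, A state is initial
      have hxc : isCompositeB x = false := by
        cases hxc : isCompositeB x
        · rfl
        · exact absurd (mem_cl x x hxc (by have := comp_ge3 _ hxc; omega) (by omega)) (by simp [hnil])
      have hr0 : r = [] := by
        by_contra hrne
        have hlr : 1 ≤ (r.length : Int) := by
          have := List.length_pos_of_ne_nil hrne; omega
        have hxmem : x ∈ r := by
          rw [hrun]
          apply PySem.List.mem_pyRange_one.mpr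
          constructor <;> omega
        have := hcomp x hxmem
        rw [hxc] at this; exact absurd this (by simp)
      have hA0 : Astate x = ([], PySem.Dict.empty) := by
        unfold Astate
        rw [hnil]
        simp
      rw [hA0] at hA
      obtain ⟨hA1, hA2⟩ := Prod.mk.injEq .. ▸ hA
      have hstep : Astate (x + 1) = ([], PySem.Dict.empty) := Astate_rec_c_nil x hx hc hnil
      rw [hstep]
      subst hr0
      have hs1 : s1 = [] := hA1.symm
      have ha : a = PySem.Dict.empty := hA2.symm
      subst hs1; subst ha
      have ht1 : t1 = [] := by
        simp [size_eq_keys_length, keys_empty_dict] at hcase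
        exact hcase
      refine ⟨hrun', hcomp', hmax', by simp [keys_empty_dict], by simp, by simp [keys_empty_dict], ?_⟩
      rw [if_neg (by simp)]
      refine ⟨by simp [ht1, size_eq_keys_length, keys_empty_dict], by simp, by simp [keys_empty_dict]⟩
    · -- cl ≠ []
      have hstep := Astate_rec_c x hx hc hnil
      rw [hA, ccStep_eval x hc hnil s1 a] at hstep
      by_cases hxc : isCompositeB x = true
      · -- run continues: getLast cl = x
        obtain ⟨hne2, hlast⟩ := cl_getLast_of_comp x hx hxc
        have hlast' : (composite_listA x).getLast hnil = x := hlast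
        rw [hlast'] at hstep
        rw [if_pos (show x + 1 - x = 1 by ring)] at hstep
        have hlr1 : 1 ≤ (r.length : Int) := by
          by_contra hlr
          have hr0 : (r.length : Int) = 0 := by omega
          exact hmax ⟨by omega, by rw [show x - (r.length:Int) = x by omega]; exact hxc⟩
        have hrne : r ≠ [] := by
          intro h0; rw [h0] at hlr1; simp at hlr1
        have hrlast? : r.getLast? = some x := by
          obtain ⟨hne3, hl3⟩ := pyRange_getLast (x + 1 - (r.length:Int)) (x + 1) (by omega)
          rw [hrun, List.getLast?_eq_some_getLast hne3, hl3]
          norm_num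
        have hmem_x_r : x ∈ r := by
          rw [hrun]
          exact PySem.List.mem_pyRange_one.mpr ⟨by omega, by omega⟩
        have hrlt : ∀ c ∈ r, c < x + 1 := by
          intro c hcm
          rw [hrun] at hcm
          exact (PySem.List.mem_pyRange_one.mp hcm).2
        by_cases hlen2 : 2 ≤ r.length
        · -- active run of length ≥ 2: a.keys = r, no flush
          rw [if_pos hlen2] at hcase
          obtain ⟨ht1, hak⟩ := hcase
          have hakne : a.keys ≠ [] := by rw [hak]; exact hrne
          have hgl : PySem.List.pyGetD a.keys (-1) 0 = x := by
            rw [PySem.List.pyGetD_neg_one _ _ hakne]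
            have h1 := List.getLast?_eq_some_getLast hakne
            have h2 : a.keys.getLast? = some x := by rw [hak]; exact hrlast?
            rw [h1] at h2
            exact Option.some_inj.mp h2
          rw [hgl] at hstep
          rw [if_neg (by push_neg; intro _; omega)] at hstep
          simp only at hstep
          have hxmemk : x ∈ a.keys := by rw [hak]; exact hmem_x_r
          have hx1nk : (x + 1) ∉ a.keys := by
            rw [hak]; intro hmm; exact absurd (hrlt _ hmm) (by omega)
          have hkeys' : ((a.insert x 0).insert (x + 1) 0).keys = r ++ [x + 1] := by
            rw [keys_insert2_mem a x (x + 1) hxmemk hx1nk, hak]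
          rw [hstep]
          refine ⟨hrun', hcomp', hmax', ?_, htupl, ?_, ?_⟩
          · exact PySem.Dict.nodup_keys_insert _ _ _ (PySem.Dict.nodup_keys_insert _ _ _ hnd)
          · intro k hk
            rw [hkeys'] at hk
            rcases List.mem_append.mp hk with h1 | h1
            · exact hcomp k h1
            · simp at h1; subst h1; exact hc
          · rw [if_pos (show 2 <= (r ++ [x+1]).length by simp only [List.length_append, List.length_singleton]; omega)]
            exact ⟨ht1, hkeys'⟩
        · -- run = [x]: flush (or a empty) and start the dict afresh with {x, x+1}
          have hlen1 : r.length = 1 := by omega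
          have hreq : r = [x] := by
            have h1 := List.getLast?_eq_some_getLast hrne
            rcases r with - | ⟨y, t⟩
            · simp at hlen1
            · rcases t with - | ⟨z, t2⟩
              · simp at hrlast?; rw [hrlast?]
              · simp at hlen1
          rw [if_neg hlen2] at hcase
          obtain ⟨ht1, himpl, hbnd⟩ := hcase
          have hkeys2 : ∀ (a' : PySem.Dict Int Int), a'.keys = [] →
              ((a'.insert x 0).insert (x + 1) 0).keys = [x, x + 1] := by
            intro a' h0
            rw [keys_insert2_not_mem a' x (x + 1) (by simp [h0]) (by simp [h0]) (by omega), h0]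
            rfl
          by_cases hsz : a.size = 0
          · -- a empty: no flush, inserts land in the empty dict
            have hs1 : s1 = [] := himpl hsz
            have hak0 : a.keys = [] := by
              have := size_eq_keys_length a
              rw [hsz] at this
              exact List.length_eq_zero_iff.mp this.symm
            rw [if_neg (by simp [hsz])] at hstep
            simp only at hstep
            rw [hstep]
            refine ⟨hrun', hcomp', hmax', ?_, htupl, ?_, ?_⟩
            · rw [hkeys2 a hak0]; simp
            · intro k hk
              rw [hkeys2 a hak0] at hk
              simp at hk
              rcases hk with h1 | h1
              · subst h1; exact hxc
              · subst h1; exact hc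
            · rw [if_pos (show 2 <= (r ++ [x+1]).length by simp only [List.length_append, List.length_singleton]; omega)]
              constructor
              · rw [ht1, hs1, hsz]; simp
              · rw [hkeys2 a hak0, hreq]; rfl
          · -- a holds the previous (flushed-to-B) run: A flushes it now
            have hakne : a.keys ≠ [] := by
              intro h0
              have := size_eq_keys_length a
              rw [h0] at this
              simp at this
              exact hsz this
            have hglb : PySem.List.pyGetD a.keys (-1) 0 < x - 1 := by
              rw [PySem.List.pyGetD_neg_one _ _ hakne]
              have := hbnd _ (List.getLast_mem hakne)
              omega
            rw [if_pos ⟨hsz, by omega⟩] at hstep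
            simp only at hstep
            rw [hstep]
            refine ⟨hrun', hcomp', hmax', ?_, ?_, ?_, ?_⟩
            · rw [hkeys2 PySem.Dict.empty keys_empty_dict]; simp
            · intro d hd
              rcases List.mem_append.mp hd with h1 | h1
              · exact htupl d h1
              · simp at h1; subst h1; exact hkeys
            · intro k hk
              rw [hkeys2 PySem.Dict.empty keys_empty_dict] at hk
              simp at hk
              rcases hk with h1 | h1
              · subst h1; exact hxc
              · subst h1; exact hc
            · rw [if_pos (show 2 <= (r ++ [x+1]).length by simp only [List.length_append, List.length_singleton]; omega)]
              constructor
              · rw [ht1, if_pos hsz]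
                simp
              · rw [hkeys2 PySem.Dict.empty keys_empty_dict, hreq]; rfl
      · -- x itself is not composite: the pair has gap ≥ 2, A skips; B starts run [x+1]
        have hxcF : isCompositeB x = false := by
          cases hxcb : isCompositeB x
          · rfl
          · exact absurd hxcb hxc
        have hglx : (composite_listA x).getLast hnil ≠ x := by
          intro h0
          have := cl_getLast_comp x hnil
          rw [h0, hxcF] at this
          simp at this
        rw [if_neg (fun heq => hglx (by omega))] at hstep
        have hr0 : r = [] := by
          by_contra hrne
          have hlr : 1 ≤ (r.length : Int) := by
            have := List.length_pos_of_ne_nil hrne; omega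
          have hxmem : x ∈ r := by
            rw [hrun]; exact PySem.List.mem_pyRange_one.mpr ⟨by omega, by omega⟩
          have := hcomp x hxmem
          rw [hxcF] at this
          simp at this
        subst hr0
        rw [hstep]
        rw [if_neg (by simp)] at hcase
        obtain ⟨ht1, himpl, hbnd⟩ := hcase
        refine ⟨hrun', hcomp', hmax', hnd, htupl, hkeys, ?_⟩
        rw [if_neg (by simp)]
        refine ⟨ht1, himpl, ?_⟩
        intro k hk
        have hb := hbnd k hk
        simp only [List.length_nil, List.nil_append, List.length_singleton] at hb ⊢
        push_cast at hb ⊢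
        omega
  · -- x+1 not composite: A unchanged, B closes the run
    have hcF : isCompositeB (x + 1) = false := by
      cases hcb : isCompositeB (x + 1)
      · rfl
      · exact absurd hcb hc
    rw [Astate_rec_nc x hx hcF, hA]
    have hBs : bStep (t1, r) (x + 1)
        = ((if 2 ≤ r.length then t1 ++ [r] else t1, []) : List (List Int) × List Int) := by
      simp [bStep, hcF]
    rw [hBs]
    have hrlt : ∀ c ∈ r, c < x + 1 := by
      intro c hcm
      rw [hrun] at hcm
      exact (PySem.List.mem_pyRange_one.mp hcm).2
    refine ⟨?_, by simp, ?_, hnd, htupl, hkeys, ?_⟩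
    · simp only [List.length_nil, Nat.cast_zero, sub_zero]
      exact (PySem.List.pyRange_one_eq_nil (by omega)).symm
    · simp only [List.length_nil, Nat.cast_zero, sub_zero]
      rintro ⟨-, h2⟩
      rw [hcF] at h2
      simp at h2
    · rw [if_neg (by simp)]
      by_cases hlen2 : 2 ≤ r.length
      · rw [if_pos hlen2] at hcase
        obtain ⟨ht1, hak⟩ := hcase
        have hsz : a.size ≠ 0 := by
          rw [size_eq_keys_length, hak]; omega
        refine ⟨?_, fun h0 => absurd h0 hsz, ?_⟩
        · simp only [if_pos hlen2, if_pos hsz]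
          rw [ht1, hak]
        · intro k hk
          rw [hak] at hk
          have := hrlt k hk
          simp only [List.length_nil, Nat.cast_zero, sub_zero]
          omega
      · rw [if_neg hlen2] at hcase
        obtain ⟨ht1, himpl, hbnd⟩ := hcase
        refine ⟨?_, himpl, ?_⟩
        · simp only [if_neg hlen2]
          exact ht1
        · intro k hk
          have hb := hbnd k hk
          simp only [List.length_nil, Nat.cast_zero, sub_zero]
          omega
lemma inv_all (m : Nat) : GInv (1 + m) (Astate (1 + m)) (Bstate (1 + m)) := by
  induction m with
  | zero => exact inv_base
  | succ k ih =>
    have h := inv_step (1 + k) (by omega) ih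
    rw [show (1:Int) + ((k + 1 : Nat) : Int) = (1 + (k : Int)) + 1 by push_cast; ring]
    exact h

def innerA (cl : PySem.Dict Int Int) : List Int × List (Int × Int) :=
  cl.keys.foldl
    (fun (t : List Int × List (Int × Int)) i =>
      let p := is_primeA i
      let lp := PySem.List.pyGetD p (-1) 0
      if lp ∈ t.1 then t else (t.1 ++ [lp], t.2 ++ [(i, lp)]))
    ([], [])

lemma inner_eq (d : PySem.Dict Int Int) (h : ∀ k ∈ d.keys, isCompositeB k = true) :
    (innerA d).2 = innerB d.keys := by
  unfold innerA innerB
  have heq : d.keys.foldl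
      (fun (t : List Int × List (Int × Int)) i =>
        let p := is_primeA i
        let lp := PySem.List.pyGetD p (-1) 0
        if lp ∈ t.1 then t else (t.1 ++ [lp], t.2 ++ [(i, lp)])) ([], [])
      = d.keys.foldl
        (fun (t : List Int × List (Int × Int)) n =>
          let p := lpfB n
          if p ∈ t.1 then t else (t.1 ++ [p], t.2 ++ [(n, p)])) ([], []) := by
    apply PySem.List.foldl_congr_mem
    intro acc i hi
    have h2 : 2 ≤ i := by have := comp_ge3 i (h i hi); omega
    simp only [lpf_eq i h2]
  rw [heq]

lemma outer_fold (ds : List (PySem.Dict Int Int)) (acc : List (List (Int × Int))) :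
    (ds.foldl (fun (s : List (List (Int × Int)) × List Int) cl =>
        let r := (cl.keys.foldl
          (fun (t : List Int × List (Int × Int)) i =>
            let p := is_primeA i
            let lp := PySem.List.pyGetD p (-1) 0
            if lp ∈ t.1 then t else (t.1 ++ [lp], t.2 ++ [(i, lp)]))
          (s.2, []))
        (s.1 ++ [r.2], [])) (acc, [])).1
      = acc ++ ds.map (fun d => (innerA d).2) := by
  induction ds generalizing acc with
  | nil => simp
  | cons d tl ih =>
    rw [List.foldl_cons]
    exact (ih (acc ++ [(innerA d).2])).trans (by simp)

lemma A_out (x : Int) : prime_of_composite_factors x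
    = ((Astate x).1 ++ [(Astate x).2]).map (fun d => (innerA d).2) := by
  have h := outer_fold ((Astate x).1 ++ [(Astate x).2]) []
  rw [List.nil_append] at h
  exact h

lemma innerA_nil (a : PySem.Dict Int Int) (h : a.keys = []) : (innerA a).2 = [] := by
  unfold innerA
  rw [h]
  rfl

lemma main_low (x : Int) (hx : x ≤ 0) :
    prime_of_composite_factors x = prime_of_composite_factors_alt x := by
  have hcl : composite_listA x = [] := by
    rw [cl_eq, PySem.List.pyRange_one_eq_nil (by omega)]
    rfl
  have hA0 : Astate x = ([], PySem.Dict.empty) := by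
    unfold Astate
    rw [hcl]
    simp
  have hB0 : Bstate x = ([], []) := by
    unfold Bstate
    rw [PySem.List.pyRange_one_eq_nil (by omega)]
    rfl
  rw [A_out, hA0, alt_eq, hB0]
  simp [innerA_nil PySem.Dict.empty keys_empty_dict]

lemma main_eq (x : Int) : prime_of_composite_factors x = prime_of_composite_factors_alt x := by
  by_cases hx : 1 ≤ x
  · have hinv : GInv x (Astate x) (Bstate x) := by
      have h := inv_all (x - 1).toNat
      rw [show (1 : Int) + ((x - 1).toNat : Int) = x by omega] at h
      exact h
    rcases hA : Astate x with ⟨s1, a⟩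
    rcases hB : Bstate x with ⟨t1, r⟩
    rw [hA, hB] at hinv
    obtain ⟨hrun, hcomp, hmax, hnd, htupl, hkeys, hcase⟩ := hinv
    simp only at hrun hcomp hmax hnd htupl hkeys hcase
    rw [A_out, alt_eq, hA, hB]
    simp only
    have hmapeq : (s1 ++ [a]).map (fun d => (innerA d).2)
        = ((s1 ++ [a]).map PySem.Dict.keys).map innerB := by
      rw [List.map_map]
      apply List.map_congr_left
      intro d hd
      apply inner_eq
      rcases List.mem_append.mp hd with h1 | h1
      · exact htupl d h1
      · simp at h1; subst h1; exact hkeys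
    by_cases hlen2 : 2 ≤ r.length
    · rw [if_pos hlen2] at hcase
      obtain ⟨ht1, hak⟩ := hcase
      rw [if_pos hlen2]
      have hruns : t1 ++ [r] = (s1 ++ [a]).map PySem.Dict.keys := by
        rw [ht1, ← hak]
        simp
      rw [hruns, ← hmapeq]
      rw [if_neg (by simp)]
    · rw [if_neg hlen2] at hcase
      obtain ⟨ht1, himpl, hbnd⟩ := hcase
      rw [if_neg hlen2]
      by_cases hsz : a.size = 0
      · have hs1 : s1 = [] := himpl hsz
        have hak0 : a.keys = [] := by
          have h0 := size_eq_keys_length a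
          rw [hsz] at h0
          exact List.length_eq_zero_iff.mp h0.symm
        have ht10 : t1 = [] := by
          rw [ht1, hs1, if_neg (by simp [hsz])]
          simp
        rw [ht10, hs1]
        simp [innerA_nil a hak0]
      · have hruns : t1 = (s1 ++ [a]).map PySem.Dict.keys := by
          rw [ht1, if_pos hsz]
          simp
        rw [hruns, ← hmapeq]
        rw [if_neg (by simp)]
  · exact main_low x (by omega)

-- ===== VERDICT (by name: the statement is the Claim_ definition above) =====
theorem prime_of_composite_factors_spec : Claim_equal_prime_of_composite_factors := by
  intro x _
  exact main_eq x
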